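-- pv_equiv track=rewrite | github.com/tostream/python | dataMaskingScript.py | convertArrVertoHor
-- ===== SOURCE A (Python) =====
-- def convertArrVertoHor(arr):
--     result = []
--     for i in range(len(arr)):
--         for j in range(len(arr[i])):
--             if len(result) < j + 1:
--                 intarr = []
--             else:
--                 intarr = result.pop(j)
--             intarr.append(arr[i][j])
--             result.insert(j, intarr)
--     return result
-- ===== SOURCE B (Python) =====
-- def convertArrVertoHor(arr):
--     # Column-major one-pass build: column j collects row[j] from every row long enough.
--     maxlen = max(map(len, arr), default=0)
--     return [[row[j] for row in arr if j < len(row)] for j in range(maxlen)]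
-- ===== Notes on version B (the rewrite author's own statement) =====
-- stated objective: faster
-- what changed: Replaces the row-by-row pop/insert shuffling of the growing column list (each element costs a pop+insert shift) with a direct column-major construction: compute the max row length once and build each column in a single comprehension pass.
import Mathlib
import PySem

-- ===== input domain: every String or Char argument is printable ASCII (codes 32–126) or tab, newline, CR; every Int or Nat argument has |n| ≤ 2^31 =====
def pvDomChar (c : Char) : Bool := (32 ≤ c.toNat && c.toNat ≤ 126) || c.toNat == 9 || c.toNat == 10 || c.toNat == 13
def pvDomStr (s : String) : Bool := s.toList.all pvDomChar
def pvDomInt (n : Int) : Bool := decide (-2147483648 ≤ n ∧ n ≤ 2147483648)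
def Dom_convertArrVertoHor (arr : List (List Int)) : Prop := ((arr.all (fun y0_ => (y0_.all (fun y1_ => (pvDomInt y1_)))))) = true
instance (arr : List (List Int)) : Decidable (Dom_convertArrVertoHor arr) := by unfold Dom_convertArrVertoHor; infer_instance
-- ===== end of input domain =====

-- B transposes the ragged array column-major in one pass instead of A's per-element pop/insert shuffling; return values proved equal on all inputs.

-- ===== PORT A =====
-- one step of A's inner loop body for row `row` at index j:
--   intarr = [] if len(result) < j+1 else result.pop(j);  intarr.append(row[j]);  result.insert(j, intarr)
-- result.pop(j) with j < len(result) removes element j: take j ++ drop (j+1) (exact);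
-- result.insert(j, v) with j ≤ len(result) is take j ++ [v] ++ drop j (exact; Python insert clamps).
-- j comes from range(len(row)), hence 0 ≤ j < len(row), so List.getD row j 0 is exactly row[j].
def pvInnerStep (row : List Int) (result : List (List Int)) (j : Nat) : List (List Int) :=
  let intarr := if result.length < j + 1 then ([] : List Int) else result.getD j []
  let result' := if result.length < j + 1 then result else result.take j ++ result.drop (j + 1)
  result'.take j ++ [intarr ++ [row.getD j 0]] ++ result'.drop j

-- `for i in range(len(arr))` visits the rows of arr in order; folded over the rows directly (exact).
def convertArrVertoHor (arr : List (List Int)) : List (List Int) :=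
  arr.foldl (fun result row => (List.range row.length).foldl (pvInnerStep row) result) []

-- ===== PORT B =====
-- maxlen = max(map(len, arr), default=0); column j = [row[j] for row in arr if j < len(row)]
def convertArrVertoHor_alt (arr : List (List Int)) : List (List Int) :=
  let maxlen := arr.foldl (fun m row => max m row.length) 0
  (List.range maxlen).map (fun j => (arr.filter (fun row => decide (j < row.length))).map (fun row => row.getD j 0))

-- ===== PRECONDITION & SPEC =====
def Spec_convertArrVertoHor (arr : List (List Int)) (out : List (List Int)) : Prop := out = convertArrVertoHor_alt arr
instance (arr : List (List Int)) (out : List (List Int)) : Decidable (Spec_convertArrVertoHor arr out) := by unfold Spec_convertArrVertoHor; infer_instance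

-- ===== CLAIM (what is proved, stated in full; the proofs are below) =====
def Claim_equal_convertArrVertoHor : Prop := ∀ (arr : List (List Int)), Dom_convertArrVertoHor arr → Spec_convertArrVertoHor arr (convertArrVertoHor arr)

-- ===== LEMMAS AND PROOFS =====

-- column j of arr, and the maximal row length (match B's subterms definitionally)
def pvCol (arr : List (List Int)) (j : Nat) : List Int :=
  (arr.filter (fun row => decide (j < row.length))).map (fun row => row.getD j 0)

def pvMaxLen (arr : List (List Int)) : Nat := arr.foldl (fun m row => max m row.length) 0

lemma pvCol_cons (r : List Int) (arr : List (List Int)) (j : Nat) :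
    pvCol (r :: arr) j = (if j < r.length then [r.getD j 0] else []) ++ pvCol arr j := by
  simp [pvCol, List.filter_cons]
  split <;> simp_all

lemma pvMaxLen_shift (arr : List (List Int)) (m : Nat) :
    arr.foldl (fun a row => max a row.length) m
      = max m (arr.foldl (fun a row => max a row.length) 0) := by
  induction arr generalizing m with
  | nil => simp
  | cons r t ih =>
      simp only [List.foldl_cons]
      rw [ih, ih (max 0 r.length)]
      omega

lemma pvMaxLen_cons (r : List Int) (arr : List (List Int)) :
    pvMaxLen (r :: arr) = max r.length (pvMaxLen arr) := by
  simp only [pvMaxLen, List.foldl_cons]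
  rw [pvMaxLen_shift]
  omega

-- characterization of the inner loop: after processing indices 0..n-1 of `row`,
-- lengths and all entries (as getD) are determined.
lemma inner_char (row : List Int) (n : Nat) (hn : n ≤ row.length) (res : List (List Int)) :
    ((List.range n).foldl (pvInnerStep row) res).length = max res.length n ∧
    ∀ j, ((List.range n).foldl (pvInnerStep row) res).getD j [] =
      res.getD j [] ++ (if j < n then [row.getD j 0] else []) := by
  induction n with
  | zero => simp
  | succ n ih =>
      obtain ⟨hlen, hget⟩ := ih (by omega)
      rw [List.range_succ, List.foldl_append]
      set L := (List.range n).foldl (pvInnerStep row) res with hL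
      simp only [List.foldl_cons, List.foldl_nil]
      by_cases hc : L.length < n + 1
      · -- new column appended at the end (take n L = L, drop n L = [])
        have hLn : L.length = n := by omega
        have hres : res.length ≤ n := by omega
        have e : pvInnerStep row L n = L ++ [[row.getD n 0]] := by
          simp [pvInnerStep, hc, List.take_of_length_le (le_of_eq hLn),
            List.drop_of_length_le (le_of_eq hLn)]
        rw [e]
        constructor
        · simp [hLn]; omega
        · intro j
          rcases lt_trichotomy j n with h | h | h
          · rw [List.getD_append _ _ _ _ (by omega)]
            rw [hget j]
            simp [h, Nat.lt_succ_of_lt h]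
          · subst h
            have : (L ++ [[row.getD j 0]]).getD j [] = [row.getD j 0] := by
              rw [List.getD_eq_getElem?_getD, List.getElem?_append_right (by omega)]
              simp [hLn]
            rw [this]
            have h2 : res.getD j [] = [] := List.getD_eq_default _ _ (by omega)
            rw [h2]
            simp
          · have h3 : (L ++ [[row.getD n 0]]).getD j [] = [] := by
              apply List.getD_eq_default
              simp [hLn]; omega
            have h2 : res.getD j [] = [] := List.getD_eq_default _ _ (by omega)
            rw [h3, h2, if_neg (show ¬ j < n + 1 by omega)]
            rfl
      · -- pop element n, append, re-insert at n: this is L.set n (L[n] ++ [row[n]])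
        have hnl : n < L.length := by omega
        have e : pvInnerStep row L n = L.set n (L.getD n [] ++ [row.getD n 0]) := by
          simp only [pvInnerStep, if_neg hc]
          have htake : (L.take n ++ L.drop (n + 1)).take n = L.take n := by
            rw [List.take_append_of_le_length (by simp; omega)]
            simp
          have hdrop : (L.take n ++ L.drop (n + 1)).drop n = L.drop (n + 1) := by
            rw [List.drop_append_of_le_length (by simp; omega)]
            simp [List.drop_of_length_le, Nat.min_eq_left (le_of_lt hnl)]
          rw [htake, hdrop, List.set_eq_take_append_cons_drop, if_pos hnl]
          simp
        rw [e]
        constructor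
        · simp [hlen]; omega
        · intro j
          by_cases hj : j = n
          · subst hj
            rw [List.getD_eq_getElem?_getD, List.getElem?_set_self (by omega)]
            simp only [Option.getD_some]
            rw [hget j]
            simp [show j < j + 1 by omega]
          · rw [List.getD_eq_getElem?_getD, List.getElem?_set_ne (by omega),
              ← List.getD_eq_getElem?_getD, hget j]
            rcases Nat.lt_or_ge j n with h | h
            · simp [h, Nat.lt_succ_of_lt h]
            · have : ¬ j < n := by omega
              have h2 : ¬ j < n + 1 := by omega
              simp [this, h2]
  
-- characterization of the outer loop
lemma outer_char (arr : List (List Int)) (res : List (List Int)) :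
    (arr.foldl (fun result row => (List.range row.length).foldl (pvInnerStep row) result) res).length
        = max res.length (pvMaxLen arr) ∧
    ∀ j, (arr.foldl (fun result row => (List.range row.length).foldl (pvInnerStep row) result) res).getD j []
        = res.getD j [] ++ pvCol arr j := by
  induction arr generalizing res with
  | nil => simp [pvMaxLen, pvCol]
  | cons r t ih =>
      simp only [List.foldl_cons]
      obtain ⟨hlen, hget⟩ := inner_char r r.length le_rfl res
      obtain ⟨ihlen, ihget⟩ := ih ((List.range r.length).foldl (pvInnerStep r) res)
      constructor
      · rw [ihlen, hlen, pvMaxLen_cons]; omega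
      · intro j
        rw [ihget j, hget j, pvCol_cons, List.append_assoc]

-- ===== VERDICT (by name: the statement is the Claim_ definition above) =====
theorem convertArrVertoHor_spec : Claim_equal_convertArrVertoHor := by
  intro arr _
  unfold Spec_convertArrVertoHor convertArrVertoHor convertArrVertoHor_alt
  obtain ⟨hlen, hget⟩ := outer_char arr []
  apply List.ext_getElem
  · simpa [pvMaxLen] using hlen
  · intro j h1 h2
    have hj : j < pvMaxLen arr := by simpa using h2
    have := hget j
    simp only [List.getD_eq_getElem?_getD, List.getElem?_eq_getElem h1] at this
    simp only [Option.getD_some] at this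
    rw [this]
    simp [pvCol]
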